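-- pv_equiv track=rewrite | github.com/thereal1024/advent_of_code | 2020/17/solution-secondary.py | expand_state_4d
-- ===== SOURCE A (Python) =====
-- def balanced_read(state, dim, pos):
--     dx, dy, dz, dq = dim
--     x, y, z, q = pos
--     return state[dq + q][dz + z][dy + y][dx + x]
--
-- def expand_state_4d(state, steps):
--     height = len(state)
--     width = len(state[0])
--     assert all(len(row) == width for row in state)
--     if width % 2 == 0:
--         state = [row + '.' for row in state]
--         width += 1
--     if height % 2 == 0:
--         state.append('.' * width)
--         height += 1
--
--     assert height % 2 == 1
--     assert width % 2 == 1
--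
--     ix, iy, iz, iq = (width - 1) // 2, (height - 1) // 2, 0, 0
--     x, y, z, q = ix + steps, iy + steps, iz + steps, iq + steps
--     dim = x, y, z, q
--     idim = ix, iy, iz, iq
--     xir, yir, zir, qir = range(-ix, ix+1), range(-iy, iy+1), range(-iz, iz+1), range(-iq, iq+1)
--     wstate = [[state]]
--     return dim, [[[''.join(balanced_read(wstate, idim, (px, py, pz, pq)) if
--                           ((px in xir) and (py in yir) and (pz in zir) and (pq in qir)) else '.'
--                      for px in range(-x, x+1)) for py in range(-y, y+1)] for pz in range(-z, z+1)] for pq in range(-q, q+1)]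
-- ===== SOURCE B (Python) =====
-- def expand_state_4d(state, steps):
--     height = len(state)
--     width = len(state[0])
--     assert all(len(row) == width for row in state)
--     if width % 2 == 0:
--         state = [row + '.' for row in state]
--         width += 1
--     if height % 2 == 0:
--         state = state + ['.' * width]
--         height += 1
--     pad = '.' * steps
--     rows = [pad + row + pad for row in state]
--     blank_row = '.' * (width + 2 * steps)
--     plane = [blank_row] * steps + rows + [blank_row] * steps
--     blank_plane = [blank_row] * (height + 2 * steps)
--     zstack = [blank_plane] * steps + [plane] + [blank_plane] * steps
--     blank_zstack = [blank_plane] * (2 * steps + 1)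
--     grid = [blank_zstack] * steps + [zstack] + [blank_zstack] * steps
--     dim = ((width - 1) // 2 + steps, (height - 1) // 2 + steps, steps, steps)
--     return dim, grid
-- ===== Notes on version B (the rewrite author's own statement) =====
-- stated objective: simpler
-- what changed: After reproducing A's even-to-odd padding, B builds the result by concatenation (pad each row with dots, stack blank rows/planes/z-stacks around the centre with list multiplication) instead of A's quadruply-nested per-cell comprehension with range-membership tests and indexed reads.
-- outside the precondition, e.g. on expand_state_4d(['.'], -1): A returns ((-1, -1, -1, -1), []), B returns ((-1, -1, -1, -1), [[['.']]])
import Mathlib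
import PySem

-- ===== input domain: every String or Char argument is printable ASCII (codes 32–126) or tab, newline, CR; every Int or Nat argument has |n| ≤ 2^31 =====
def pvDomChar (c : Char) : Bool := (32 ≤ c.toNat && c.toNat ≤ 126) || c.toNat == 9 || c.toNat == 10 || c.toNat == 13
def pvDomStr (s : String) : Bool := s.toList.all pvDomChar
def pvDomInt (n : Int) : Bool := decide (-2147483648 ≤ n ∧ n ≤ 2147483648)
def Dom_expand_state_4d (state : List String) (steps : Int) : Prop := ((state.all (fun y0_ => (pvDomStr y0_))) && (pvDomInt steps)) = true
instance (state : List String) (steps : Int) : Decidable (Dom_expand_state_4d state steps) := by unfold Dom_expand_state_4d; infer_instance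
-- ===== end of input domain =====

-- B builds the padded 4D grid by concatenation (replicated blank rows/planes around the padded
-- centre) instead of A's per-cell range-membership tests; objective: simpler.
-- Side effects: when the input's width is odd and its height even, Python A mutates the caller's
-- list (state.append); B never mutates. The equivalence proved here is about the return value.

-- Python `'.' * n` (a string of n dots; n ≤ 0 gives ''): exact via toNat.
def dotStr (n : Int) : String := String.ofList (List.replicate n.toNat '.')

-- ===== PORT A =====
-- A's helper; the .getD defaults are unreachable in A (indices are guarded), kept only for totality.
def balanced_read (st : List (List (List String))) (dim : Int × Int × Int × Int)
    (pos : Int × Int × Int × Int) : String :=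
  let (dx, dy, dz, dq) := dim
  let (x, y, z, q) := pos
  let s3 := (PySem.List.pyGet? st (dq + q)).getD []
  let s2 := (PySem.List.pyGet? s3 (dz + z)).getD []
  let s1 := (PySem.List.pyGet? s2 (dy + y)).getD ""
  match PySem.Str.pyGet? s1 (dx + x) with
  | some c => String.ofList [c]
  | none => ""

def expand_state_4d (state : List String) (steps : Int) :
    (Int × Int × Int × Int) × List (List (List String)) :=
  let height : Int := state.length
  let width : Int := PySem.Str.len ((PySem.List.pyGet? state 0).getD "")  -- state[0]; Pre_ excludes state = []
  -- assert all(len(row) == width …): Pre_ excludes ragged inputs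
  let state1 := if PySem.Int.mod width 2 = 0 then state.map (fun row => row ++ ".") else state
  let width1 := if PySem.Int.mod width 2 = 0 then width + 1 else width
  let state2 := if PySem.Int.mod height 2 = 0 then state1 ++ [dotStr width1] else state1
  let height1 := if PySem.Int.mod height 2 = 0 then height + 1 else height
  let ix := PySem.Int.floordiv (width1 - 1) 2
  let iy := PySem.Int.floordiv (height1 - 1) 2
  let iz : Int := 0
  let iq : Int := 0
  let x := ix + steps
  let y := iy + steps
  let z := iz + steps
  let q := iq + steps
  let dim := (x, y, z, q)
  let idim := (ix, iy, iz, iq)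
  let xir := PySem.List.pyRange (-ix) (ix + 1) 1
  let yir := PySem.List.pyRange (-iy) (iy + 1) 1
  let zir := PySem.List.pyRange (-iz) (iz + 1) 1
  let qir := PySem.List.pyRange (-iq) (iq + 1) 1
  let wstate := [[state2]]
  (dim, (PySem.List.pyRange (-q) (q + 1) 1).map (fun pq =>
    (PySem.List.pyRange (-z) (z + 1) 1).map (fun pz =>
      (PySem.List.pyRange (-y) (y + 1) 1).map (fun py =>
        PySem.Str.join "" ((PySem.List.pyRange (-x) (x + 1) 1).map (fun px =>
          if px ∈ xir ∧ py ∈ yir ∧ pz ∈ zir ∧ pq ∈ qir then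
            balanced_read wstate idim (px, py, pz, pq)
          else "."))))))

-- ===== PORT B =====
def expand_state_4d_alt (state : List String) (steps : Int) :
    (Int × Int × Int × Int) × List (List (List String)) :=
  let height : Int := state.length
  let width : Int := PySem.Str.len ((PySem.List.pyGet? state 0).getD "")  -- state[0]; Pre_ excludes state = []
  let state1 := if PySem.Int.mod width 2 = 0 then state.map (fun row => row ++ ".") else state
  let width1 := if PySem.Int.mod width 2 = 0 then width + 1 else width
  let state2 := if PySem.Int.mod height 2 = 0 then state1 ++ [dotStr width1] else state1
  let height1 := if PySem.Int.mod height 2 = 0 then height + 1 else height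
  let pad := dotStr steps
  let rows := state2.map (fun row => pad ++ row ++ pad)
  let blankRow := dotStr (width1 + 2 * steps)
  -- Python `[x] * n` is PySem.List.pyRepeat [x] n
  let plane := PySem.List.pyRepeat [blankRow] steps ++ rows ++ PySem.List.pyRepeat [blankRow] steps
  let blankPlane := PySem.List.pyRepeat [blankRow] (height1 + 2 * steps)
  let zstack := PySem.List.pyRepeat [blankPlane] steps ++ [plane] ++ PySem.List.pyRepeat [blankPlane] steps
  let blankZstack := PySem.List.pyRepeat [blankPlane] (2 * steps + 1)
  let grid := PySem.List.pyRepeat [blankZstack] steps ++ [zstack] ++ PySem.List.pyRepeat [blankZstack] steps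
  ((PySem.Int.floordiv (width1 - 1) 2 + steps, PySem.Int.floordiv (height1 - 1) 2 + steps, steps, steps), grid)

-- ===== PRECONDITION & SPEC =====
-- Pre_ excludes inputs on which A raises — empty state (IndexError on state[0]) and ragged rows
-- (AssertionError) — and negative steps, a meaningless padding count on which A's value (ranges
-- emptied by range(-x, x+1)) and B's (lists emptied by negative list multiplication) are both
-- accidental artefacts and neither is the specified behaviour.
def Pre_expand_state_4d (state : List String) (steps : Int) : Prop :=
  state ≠ [] ∧ (∀ row ∈ state, PySem.Str.len row = PySem.Str.len (state.headD "")) ∧ 0 ≤ steps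
instance (state : List String) (steps : Int) : Decidable (Pre_expand_state_4d state steps) := by
  unfold Pre_expand_state_4d; infer_instance

def pvWitness_expand_state_4d : List String × Int := (["#.", ".#"], 1)

def Spec_expand_state_4d (state : List String) (steps : Int)
    (out : (Int × Int × Int × Int) × List (List (List String))) : Prop :=
  out = expand_state_4d_alt state steps
instance (state : List String) (steps : Int)
    (out : (Int × Int × Int × Int) × List (List (List String))) :
    Decidable (Spec_expand_state_4d state steps out) := by
  unfold Spec_expand_state_4d; infer_instance

-- ===== CLAIM (what is proved, stated in full; the proofs are below) =====
def Claim_equal_expand_state_4d : Prop := ∀ (state : List String) (steps : Int),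
  Dom_expand_state_4d state steps → Pre_expand_state_4d state steps →
  Spec_expand_state_4d state steps (expand_state_4d state steps)

-- ===== LEMMAS AND PROOFS =====

-- canonical (B-shaped) building blocks of the result, used to state the bridge lemmas
def bRow (ix s : Int) : String := dotStr (2*ix+1 + 2*s)
def bRows (st : List String) (s : Int) : List String :=
  st.map (fun row => dotStr s ++ row ++ dotStr s)
def bPlane (ix iy s : Int) : List String :=
  List.replicate (2*iy+1 + 2*s).toNat (bRow ix s)
def bPlaneC (st : List String) (ix s : Int) : List String :=
  List.replicate s.toNat (bRow ix s) ++ bRows st s ++ List.replicate s.toNat (bRow ix s)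
def bZ (ix iy s : Int) : List (List String) :=
  List.replicate (2*s+1).toNat (bPlane ix iy s)
def bZC (st : List String) (ix iy s : Int) : List (List String) :=
  List.replicate s.toNat (bPlane ix iy s) ++ [bPlaneC st ix s] ++ List.replicate s.toNat (bPlane ix iy s)
def bGrid (st : List String) (ix iy s : Int) : List (List (List String)) :=
  List.replicate s.toNat (bZ ix iy s) ++ [bZC st ix iy s] ++ List.replicate s.toNat (bZ ix iy s)

lemma intercalate_nil_left {α : Type} (l : List (List α)) : List.intercalate [] l = l.flatten := by
  induction l with
  | nil => simp [List.intercalate]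
  | cons a t ih =>
    cases t with
    | nil => simp [List.intercalate]
    | cons b t' =>
      simp only [List.intercalate, List.intersperse] at *
      simp_all

lemma join_empty_toList (parts : List String) :
    (PySem.Str.join "" parts).toList = (parts.map String.toList).flatten := by
  simp [PySem.Str.toList_join, PySem.Chars.join]
  exact intercalate_nil_left _

lemma join_blank (n : Nat) :
    PySem.Str.join "" (List.replicate n ".") = String.ofList (List.replicate n '.') := by
  apply String.toList_inj.mp
  rw [join_empty_toList]
  simp [List.map_replicate]

lemma map_const_on {α : Type} (f : Int → α) (a b : Int) (c : α)
    (h : ∀ i, a ≤ i → i < b → f i = c) :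
    (PySem.List.pyRange a b 1).map f = List.replicate (b-a).toNat c := by
  apply List.eq_replicate_iff.mpr
  refine ⟨by simp [PySem.List.length_pyRange_one], ?_⟩
  intro x hx
  simp only [List.mem_map] at hx
  obtain ⟨i, hi, rfl⟩ := hx
  rw [PySem.List.mem_pyRange_one] at hi
  exact h i hi.1 hi.2

lemma map_range_center {α β : Type} (xs : List α) (n : Int) (hn : 0 ≤ n)
    (hlen : (xs.length : Int) = 2*n+1) (f : Option α → β) :
    (PySem.List.pyRange (-n) (n+1) 1).map (fun p => f (PySem.List.pyGet? xs (n + p)))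
      = xs.map (fun a => f (some a)) := by
  rw [PySem.List.pyRange_one, List.map_map]
  apply List.ext_getElem
  · simp; omega
  · intro k h1 h2
    simp only [List.getElem_map, List.getElem_range, Function.comp]
    congr 1
    have hk : (k : Int) = n + (-n + k) := by ring
    have hklt : k < xs.length := by simp at h1; omega
    rw [← hk, PySem.List.pyGet?_natCast]
    simp [hklt]

lemma map_range_split {α : Type} (f : Int → α) (n m : Int) (hn : 0 ≤ n) (hm : 0 ≤ m) :
    (PySem.List.pyRange (-(n+m)) (n+m+1) 1).map f =
      (PySem.List.pyRange (-(n+m)) (-n) 1).map f ++ (PySem.List.pyRange (-n) (n+1) 1).map f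
        ++ (PySem.List.pyRange (n+1) (n+m+1) 1).map f := by
  rw [PySem.List.pyRange_one_append (-(n+m)) (-n) (n+m+1) (by omega) (by omega),
      PySem.List.pyRange_one_append (-n) (n+1) (n+m+1) (by omega) (by omega)]
  simp [List.map_append]

lemma map_range_split0 {α : Type} (f : Int → α) (m : Int) (hm : 0 ≤ m) :
    (PySem.List.pyRange (-m) (m+1) 1).map f =
      (PySem.List.pyRange (-m) 0 1).map f ++ [f 0] ++ (PySem.List.pyRange 1 (m+1) 1).map f := by
  rw [PySem.List.pyRange_one_append (-m) 0 (m+1) (by omega) (by omega),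
      PySem.List.pyRange_one_cons (a := 0) (b := m+1) (by omega)]
  simp [List.map_append]

lemma row_join (row : String) (ix s : Int) (hx : 0 ≤ ix) (hs : 0 ≤ s)
    (hlen : (row.toList.length : Int) = 2*ix+1) :
    PySem.Str.join "" ((PySem.List.pyRange (-(ix+s)) (ix+s+1) 1).map (fun px =>
      if px ∈ PySem.List.pyRange (-ix) (ix+1) 1 then
        (match PySem.Str.pyGet? row (ix+px) with
         | some c => String.ofList [c]
         | none => "")
      else "."))
    = dotStr s ++ row ++ dotStr s := by
  rw [map_range_split _ ix s hx hs]
  rw [map_const_on _ (-(ix+s)) (-ix) "." (by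
    intro i h1 h2
    rw [if_neg]
    rw [PySem.List.mem_pyRange_one]
    omega)]
  rw [map_const_on _ (ix+1) (ix+s+1) "." (by
    intro i h1 h2
    rw [if_neg]
    rw [PySem.List.mem_pyRange_one]
    omega)]
  have hmid : (PySem.List.pyRange (-ix) (ix+1) 1).map (fun px =>
      if px ∈ PySem.List.pyRange (-ix) (ix+1) 1 then
        (match PySem.Str.pyGet? row (ix+px) with
         | some c => String.ofList [c]
         | none => "")
      else ".")
      = row.toList.map (fun c => String.ofList [c]) := by
    rw [List.map_congr_left (g := fun px =>
        (match PySem.List.pyGet? row.toList (ix+px) with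
         | some c => String.ofList [c]
         | none => "")) (by
      intro px hpx
      rw [if_pos hpx]
      simp)]
    have := map_range_center row.toList ix hx hlen
      (fun o => match o with | some c => String.ofList [c] | none => "")
    simpa using this
  rw [hmid]
  have e1 : (-ix) - (-(ix+s)) = s := by ring
  have e2 : (ix+s+1) - (ix+1) = s := by ring
  rw [e1, e2]
  apply String.toList_inj.mp
  rw [join_empty_toList]
  simp [dotStr, List.map_replicate, List.flatten_append]
  induction row.toList with
  | nil => simp
  | cons c t ih => simp [ih]

lemma balanced_read_eq (st : List String) (ix iy px py : Int) :
    balanced_read [[st]] (ix, iy, 0, 0) (px, py, 0, 0)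
      = (match PySem.Str.pyGet? ((PySem.List.pyGet? st (iy+py)).getD "") (ix+px) with
         | some c => String.ofList [c]
         | none => "") := by
  simp [balanced_read, PySem.List.pyGet?, PySem.List.pyIdx?]

lemma plane_blank (st : List String) (ix iy s pz pq : Int)
    (hfail : ¬ (pz ∈ PySem.List.pyRange 0 1 1 ∧ pq ∈ PySem.List.pyRange 0 1 1)) :
    (PySem.List.pyRange (-(iy+s)) (iy+s+1) 1).map (fun py =>
      PySem.Str.join "" ((PySem.List.pyRange (-(ix+s)) (ix+s+1) 1).map (fun px =>
        if px ∈ PySem.List.pyRange (-ix) (ix+1) 1 ∧ py ∈ PySem.List.pyRange (-iy) (iy+1) 1 ∧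
           pz ∈ PySem.List.pyRange 0 1 1 ∧ pq ∈ PySem.List.pyRange 0 1 1 then
          balanced_read [[st]] (ix, iy, 0, 0) (px, py, pz, pq)
        else ".")))
    = bPlane ix iy s := by
  rw [map_const_on _ _ _ (bRow ix s) (by
    intro py _ _
    rw [map_const_on _ _ _ "." (by
      intro px _ _
      rw [if_neg]
      tauto)]
    rw [join_blank]
    have e : (ix+s+1) - -(ix+s) = 2*ix+1 + 2*s := by ring
    rw [e]
    rfl)]
  have e : (iy+s+1) - -(iy+s) = 2*iy+1 + 2*s := by ring
  rw [e]
  rfl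

lemma plane_center (st : List String) (ix iy s : Int) (hx : 0 ≤ ix) (hy : 0 ≤ iy) (hs : 0 ≤ s)
    (hlen : (st.length : Int) = 2*iy+1)
    (hrow : ∀ row ∈ st, (row.toList.length : Int) = 2*ix+1) :
    (PySem.List.pyRange (-(iy+s)) (iy+s+1) 1).map (fun py =>
      PySem.Str.join "" ((PySem.List.pyRange (-(ix+s)) (ix+s+1) 1).map (fun px =>
        if px ∈ PySem.List.pyRange (-ix) (ix+1) 1 ∧ py ∈ PySem.List.pyRange (-iy) (iy+1) 1 ∧
           (0:Int) ∈ PySem.List.pyRange 0 1 1 ∧ (0:Int) ∈ PySem.List.pyRange 0 1 1 then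
          balanced_read [[st]] (ix, iy, 0, 0) (px, py, 0, 0)
        else ".")))
    = bPlaneC st ix s := by
  have h0 : (0:Int) ∈ PySem.List.pyRange 0 1 1 := by
    rw [PySem.List.mem_pyRange_one]; omega
  simp only [h0, and_true]
  rw [map_range_split _ iy s hy hs]
  have hmid : (PySem.List.pyRange (-iy) (iy+1) 1).map (fun py =>
      PySem.Str.join "" ((PySem.List.pyRange (-(ix+s)) (ix+s+1) 1).map (fun px =>
        if px ∈ PySem.List.pyRange (-ix) (ix+1) 1 ∧ py ∈ PySem.List.pyRange (-iy) (iy+1) 1 then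
          balanced_read [[st]] (ix, iy, 0, 0) (px, py, 0, 0)
        else ".")))
      = bRows st s := by
    rw [List.map_congr_left (g := fun py =>
        (fun o : Option String => PySem.Str.join ""
          ((PySem.List.pyRange (-(ix+s)) (ix+s+1) 1).map (fun px =>
            if px ∈ PySem.List.pyRange (-ix) (ix+1) 1 then
              (match PySem.Str.pyGet? (o.getD "") (ix+px) with
               | some c => String.ofList [c]
               | none => "")
            else "."))) (PySem.List.pyGet? st (iy+py))) (by
      intro py hpy
      simp only [hpy, and_true, balanced_read_eq])]
    rw [map_range_center st iy hy hlen (fun o : Option String => PySem.Str.join ""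
          ((PySem.List.pyRange (-(ix+s)) (ix+s+1) 1).map (fun px =>
            if px ∈ PySem.List.pyRange (-ix) (ix+1) 1 then
              (match PySem.Str.pyGet? (o.getD "") (ix+px) with
               | some c => String.ofList [c]
               | none => "")
            else ".")))]
    unfold bRows
    apply List.map_congr_left
    intro row hrow'
    simp only [Option.getD_some]
    exact row_join row ix s hx hs (hrow row hrow')
  rw [hmid]
  rw [map_const_on _ (-(iy+s)) (-iy) (bRow ix s) (by
    intro py h1 h2
    rw [map_const_on _ _ _ "." (by
      intro px _ _
      rw [if_neg]
      rw [not_and]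
      intro _
      rw [PySem.List.mem_pyRange_one]
      omega)]
    rw [join_blank]
    have e : (ix+s+1) - -(ix+s) = 2*ix+1 + 2*s := by ring
    rw [e]
    rfl)]
  rw [map_const_on _ (iy+1) (iy+s+1) (bRow ix s) (by
    intro py h1 h2
    rw [map_const_on _ _ _ "." (by
      intro px _ _
      rw [if_neg]
      rw [not_and]
      intro _
      rw [PySem.List.mem_pyRange_one]
      omega)]
    rw [join_blank]
    have e : (ix+s+1) - -(ix+s) = 2*ix+1 + 2*s := by ring
    rw [e]
    rfl)]
  have e1 : (-iy) - (-(iy+s)) = s := by ring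
  have e2 : (iy+s+1) - (iy+1) = s := by ring
  rw [e1, e2]
  rfl

lemma grid_main (st : List String) (ix iy s : Int) (hx : 0 ≤ ix) (hy : 0 ≤ iy) (hs : 0 ≤ s)
    (hlen : (st.length : Int) = 2*iy+1)
    (hrow : ∀ row ∈ st, (row.toList.length : Int) = 2*ix+1) :
    (PySem.List.pyRange (-s) (s+1) 1).map (fun pq =>
      (PySem.List.pyRange (-s) (s+1) 1).map (fun pz =>
        (PySem.List.pyRange (-(iy+s)) (iy+s+1) 1).map (fun py =>
          PySem.Str.join "" ((PySem.List.pyRange (-(ix+s)) (ix+s+1) 1).map (fun px =>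
            if px ∈ PySem.List.pyRange (-ix) (ix+1) 1 ∧ py ∈ PySem.List.pyRange (-iy) (iy+1) 1 ∧
               pz ∈ PySem.List.pyRange 0 1 1 ∧ pq ∈ PySem.List.pyRange 0 1 1 then
              balanced_read [[st]] (ix, iy, 0, 0) (px, py, pz, pq)
            else ".")))))
    = bGrid st ix iy s := by
  have hzb : ∀ pq : Int, ¬ (pq ∈ PySem.List.pyRange 0 1 1) →
      (PySem.List.pyRange (-s) (s+1) 1).map (fun pz =>
        (PySem.List.pyRange (-(iy+s)) (iy+s+1) 1).map (fun py =>
          PySem.Str.join "" ((PySem.List.pyRange (-(ix+s)) (ix+s+1) 1).map (fun px =>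
            if px ∈ PySem.List.pyRange (-ix) (ix+1) 1 ∧ py ∈ PySem.List.pyRange (-iy) (iy+1) 1 ∧
               pz ∈ PySem.List.pyRange 0 1 1 ∧ pq ∈ PySem.List.pyRange 0 1 1 then
              balanced_read [[st]] (ix, iy, 0, 0) (px, py, pz, pq)
            else ".")))) = bZ ix iy s := by
    intro pq hpq
    rw [map_const_on _ _ _ (bPlane ix iy s) (by
      intro pz _ _
      exact plane_blank st ix iy s pz pq (by tauto))]
    have e : (s+1) - (-s) = 2*s+1 := by ring
    rw [e]
    rfl
  rw [map_range_split0 _ s hs]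
  rw [map_const_on _ _ _ (bZ ix iy s) (by
    intro pq _ h2
    apply hzb
    rw [PySem.List.mem_pyRange_one]
    omega)]
  rw [map_const_on _ _ _ (bZ ix iy s) (by
    intro pq h1 _
    apply hzb
    rw [PySem.List.mem_pyRange_one]
    omega)]
  have hc : (PySem.List.pyRange (-s) (s+1) 1).map (fun pz =>
      (PySem.List.pyRange (-(iy+s)) (iy+s+1) 1).map (fun py =>
        PySem.Str.join "" ((PySem.List.pyRange (-(ix+s)) (ix+s+1) 1).map (fun px =>
          if px ∈ PySem.List.pyRange (-ix) (ix+1) 1 ∧ py ∈ PySem.List.pyRange (-iy) (iy+1) 1 ∧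
             pz ∈ PySem.List.pyRange 0 1 1 ∧ (0:Int) ∈ PySem.List.pyRange 0 1 1 then
            balanced_read [[st]] (ix, iy, 0, 0) (px, py, pz, 0)
          else ".")))) = bZC st ix iy s := by
    rw [map_range_split0 _ s hs]
    rw [map_const_on _ _ _ (bPlane ix iy s) (by
      intro pz _ h2
      apply plane_blank st ix iy s pz 0
      rw [not_and]
      intro hmem _
      rw [PySem.List.mem_pyRange_one] at hmem
      omega)]
    rw [map_const_on _ _ _ (bPlane ix iy s) (by
      intro pz h1 _
      apply plane_blank st ix iy s pz 0
      rw [not_and]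
      intro hmem _
      rw [PySem.List.mem_pyRange_one] at hmem
      omega)]
    rw [plane_center st ix iy s hx hy hs hlen hrow]
    unfold bZC
    have e1 : (0 : Int) - (-s) = s := by ring
    have e2 : (s+1) - 1 = s := by ring
    rw [e1, e2]
  rw [hc]
  unfold bGrid
  have e1 : (0 : Int) - (-s) = s := by ring
  have e2 : (s+1) - 1 = s := by ring
  rw [e1, e2]

lemma floordiv_two (a : Int) : PySem.Int.floordiv a 2 = a / 2 := by
  simp [PySem.Int.floordiv, Int.fdiv_eq_ediv]

lemma mod_two (a : Int) : PySem.Int.mod a 2 = a % 2 := by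
  simp [PySem.Int.mod, Int.fmod_eq_emod]

lemma post_padding (st2 : List String) (steps W1 H1 : Int) (hs : 0 ≤ steps)
    (hW1 : 1 ≤ W1) (hH1 : 1 ≤ H1)
    (hWo : W1 % 2 = 1) (hHo : H1 % 2 = 1)
    (hlen : (st2.length : Int) = H1)
    (hrow : ∀ row ∈ st2, (row.toList.length : Int) = W1) :
    ((PySem.Int.floordiv (W1-1) 2 + steps, PySem.Int.floordiv (H1-1) 2 + steps, steps, steps),
     (PySem.List.pyRange (-steps) (steps+1) 1).map (fun pq =>
       (PySem.List.pyRange (-steps) (steps+1) 1).map (fun pz =>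
         (PySem.List.pyRange (-(PySem.Int.floordiv (H1-1) 2 + steps)) (PySem.Int.floordiv (H1-1) 2 + steps + 1) 1).map (fun py =>
           PySem.Str.join "" ((PySem.List.pyRange (-(PySem.Int.floordiv (W1-1) 2 + steps)) (PySem.Int.floordiv (W1-1) 2 + steps + 1) 1).map (fun px =>
             if px ∈ PySem.List.pyRange (-(PySem.Int.floordiv (W1-1) 2)) (PySem.Int.floordiv (W1-1) 2 + 1) 1 ∧
                py ∈ PySem.List.pyRange (-(PySem.Int.floordiv (H1-1) 2)) (PySem.Int.floordiv (H1-1) 2 + 1) 1 ∧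
                pz ∈ PySem.List.pyRange 0 1 1 ∧ pq ∈ PySem.List.pyRange 0 1 1 then
               balanced_read [[st2]] (PySem.Int.floordiv (W1-1) 2, PySem.Int.floordiv (H1-1) 2, 0, 0) (px, py, pz, pq)
             else "."))))))
    = ((PySem.Int.floordiv (W1-1) 2 + steps, PySem.Int.floordiv (H1-1) 2 + steps, steps, steps),
       List.replicate steps.toNat (List.replicate (2*steps+1).toNat (List.replicate (H1 + 2*steps).toNat (dotStr (W1 + 2*steps)))) ++
       [ List.replicate steps.toNat (List.replicate (H1 + 2*steps).toNat (dotStr (W1 + 2*steps))) ++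
         [ List.replicate steps.toNat (dotStr (W1 + 2*steps)) ++
           st2.map (fun row => dotStr steps ++ row ++ dotStr steps) ++
           List.replicate steps.toNat (dotStr (W1 + 2*steps)) ] ++
         List.replicate steps.toNat (List.replicate (H1 + 2*steps).toNat (dotStr (W1 + 2*steps))) ] ++
       List.replicate steps.toNat (List.replicate (2*steps+1).toNat (List.replicate (H1 + 2*steps).toNat (dotStr (W1 + 2*steps))))) := by
  apply congrArg (Prod.mk _)
  rw [floordiv_two, floordiv_two]
  have hWodd : 2 * ((W1-1) / 2) + 1 = W1 := by omega
  have hHodd : 2 * ((H1-1) / 2) + 1 = H1 := by omega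
  rw [grid_main st2 ((W1-1)/2) ((H1-1)/2) steps (by omega) (by omega) hs
    (by rw [hlen]; omega)
    (by intro row hr; rw [hrow row hr]; omega)]
  unfold bGrid bZC bZ bPlaneC bPlane bRows bRow
  rw [hWodd, hHodd]

-- ===== VERDICT (by name: the statement is the Claim_ definition above) =====
theorem expand_state_4d_spec : Claim_equal_expand_state_4d := by
  intro state steps hdom hpre
  obtain ⟨hne, hrect, hsteps⟩ := hpre
  obtain ⟨r, t, rfl⟩ := List.exists_cons_of_ne_nil hne
  unfold Spec_expand_state_4d expand_state_4d expand_state_4d_alt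
  simp only [zero_add, neg_zero, PySem.List.pyRepeat_singleton]
  have hget : (PySem.List.pyGet? (r :: t) 0).getD "" = r := by
    simp [PySem.List.pyGet?, PySem.List.pyIdx?]
  rw [hget]
  rw [hget] at *
  have hW0 : PySem.Str.len r = (r.toList.length : Int) := by simp
  have hWnn : 0 ≤ PySem.Str.len r := by rw [hW0]; positivity
  have hrect' : ∀ row ∈ r :: t, (row.toList.length : Int) = PySem.Str.len r := by
    intro row hr
    have := hrect row hr
    simp only [List.headD_cons] at this
    rw [← this]; simp
  split_ifs with hw hh hh2
  · rw [mod_two] at hw hh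
    refine post_padding _ steps (PySem.Str.len r + 1) ((↑(r :: t).length : Int) + 1) hsteps
      (by omega) (by simp; try positivity) (by omega) (by omega) (by simp; try positivity) ?_
    intro row hr
    rcases List.mem_append.mp hr with h | h
    · obtain ⟨row0, hrow0, rfl⟩ := List.mem_map.mp h
      have := hrect' row0 hrow0
      simp only [String.toList_append]
      push_cast
      simp only [List.length_append]
      push_cast
      rw [← this]
      simp [String.toList]
    · simp only [List.mem_singleton] at h
      subst h
      simp only [dotStr, String.toList_ofList, List.length_replicate]
      omega
  · rw [mod_two] at hw hh
    refine post_padding _ steps (PySem.Str.len r + 1) ((↑(r :: t).length : Int)) hsteps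
      (by omega) (by simp; try positivity) (by omega) (by omega) (by simp; try positivity) ?_
    intro row hr
    obtain ⟨row0, hrow0, rfl⟩ := List.mem_map.mp hr
    have := hrect' row0 hrow0
    simp only [String.toList_append]
    push_cast
    simp only [List.length_append]
    push_cast
    rw [← this]
    simp [String.toList]
  · rw [mod_two] at hw hh2
    refine post_padding _ steps (PySem.Str.len r) ((↑(r :: t).length : Int) + 1) hsteps
      (by omega) (by simp; try positivity) (by omega) (by omega) (by simp; try positivity) ?_
    intro row hr
    rcases List.mem_append.mp hr with h | h
    · exact hrect' row h
    · simp only [List.mem_singleton] at h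
      subst h
      simp only [dotStr, String.toList_ofList, List.length_replicate]
      omega
  · rw [mod_two] at hw hh2
    exact post_padding _ steps (PySem.Str.len r) ((↑(r :: t).length : Int)) hsteps
      (by omega) (by simp; try positivity) (by omega) (by omega) (by simp; try positivity) hrect'
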